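-- pv_equiv track=rewrite | github.com/270aldo/Genesis_NGX_1.0 | backend/agents/nova_biohacking_innovator/skills/supplement_protocols.py | _assess_evidence_level
-- ===== SOURCE A (Python) =====
-- from typing import Dict, Any, List
--
-- def _assess_evidence_level(goals: List[str]) -> str:
--     """Assess evidence level for protocol goals."""
--     high_evidence = ["general_health", "vitamin_deficiency", "immune_support"]
--     moderate_evidence = ["cognitive_enhancement", "athletic_performance", "sleep"]
--
--     for goal in goals:
--         if goal in high_evidence:
--             return "high"
--
--     for goal in goals:
--         if goal in moderate_evidence:
--             return "moderate"
--
--     return "emerging"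
-- ===== SOURCE B (Python) =====
-- def _assess_evidence_level(goals):
--     """Assess evidence level for protocol goals (single pass with a flag)."""
--     high_evidence = {"general_health", "vitamin_deficiency", "immune_support"}
--     moderate_evidence = {"cognitive_enhancement", "athletic_performance", "sleep"}
--
--     saw_moderate = False
--     for goal in goals:
--         if goal in high_evidence:
--             return "high"
--         if goal in moderate_evidence:
--             saw_moderate = True
--     return "moderate" if saw_moderate else "emerging"
-- ===== Notes on version B (the rewrite author's own statement) =====
-- stated objective: simpler
-- what changed: Replaces A's two separate scans over goals by one single pass that returns 'high' immediately and accumulates a saw_moderate flag.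
import Mathlib
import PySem

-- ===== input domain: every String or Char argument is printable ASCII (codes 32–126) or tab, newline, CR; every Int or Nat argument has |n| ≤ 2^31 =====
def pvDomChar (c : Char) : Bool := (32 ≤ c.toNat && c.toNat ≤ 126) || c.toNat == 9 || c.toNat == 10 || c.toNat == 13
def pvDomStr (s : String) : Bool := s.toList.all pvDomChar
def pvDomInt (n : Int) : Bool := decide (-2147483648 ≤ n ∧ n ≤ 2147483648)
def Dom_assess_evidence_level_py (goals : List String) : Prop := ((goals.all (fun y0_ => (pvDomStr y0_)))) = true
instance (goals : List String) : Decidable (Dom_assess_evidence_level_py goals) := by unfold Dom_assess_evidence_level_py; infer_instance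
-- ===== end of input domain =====

-- B fuses A's two scans into one pass with a saw_moderate flag; objective: simpler.

-- ===== PORT A =====
def pvHighEvidence : List String := ["general_health", "vitamin_deficiency", "immune_support"]
def pvModerateEvidence : List String := ["cognitive_enhancement", "athletic_performance", "sleep"]

-- second loop of A: 'for goal in goals: if goal in moderate_evidence: return "moderate"'
def pvALoop2 : List String → String
  | [] => "emerging"
  | g :: rest => if pvModerateEvidence.contains g then "moderate" else pvALoop2 rest

-- first loop of A over goals, falling through to the second loop over the full list
def pvALoop1 : List String → List String → String
  | [], all => pvALoop2 all
  | g :: rest, all => if pvHighEvidence.contains g then "high" else pvALoop1 rest all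

def assess_evidence_level_py (goals : List String) : String := pvALoop1 goals goals

-- ===== PORT B =====
-- single pass with an accumulator flag saw_moderate
def pvBLoop : List String → Bool → String
  | [], saw => if saw then "moderate" else "emerging"
  | g :: rest, saw =>
      if pvHighEvidence.contains g then "high"
      else pvBLoop rest (saw || pvModerateEvidence.contains g)

def assess_evidence_level_py_alt (goals : List String) : String := pvBLoop goals false

-- ===== PRECONDITION & SPEC =====
def Spec_assess_evidence_level_py (goals : List String) (out : String) : Prop := out = assess_evidence_level_py_alt goals
instance (goals : List String) (out : String) : Decidable (Spec_assess_evidence_level_py goals out) := by unfold Spec_assess_evidence_level_py; infer_instance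

-- ===== CLAIM (what is proved, stated in full; the proofs are below) =====
def Claim_equal_assess_evidence_level_py : Prop := ∀ (goals : List String), Dom_assess_evidence_level_py goals → Spec_assess_evidence_level_py goals (assess_evidence_level_py goals)

-- ===== LEMMAS AND PROOFS =====

theorem pvALoop2_char (xs : List String) :
    pvALoop2 xs = if xs.any (pvModerateEvidence.contains ·) then "moderate" else "emerging" := by
  induction xs with
  | nil => simp [pvALoop2]
  | cons g rest ih => by_cases h : g ∈ pvModerateEvidence <;> simp [pvALoop2, h, ih]

theorem pvALoop1_char (xs all : List String) :
    pvALoop1 xs all = if xs.any (pvHighEvidence.contains ·) then "high" else pvALoop2 all := by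
  induction xs with
  | nil => simp [pvALoop1]
  | cons g rest ih => by_cases h : g ∈ pvHighEvidence <;> simp [pvALoop1, h, ih]

theorem pvBLoop_char (xs : List String) (saw : Bool) :
    pvBLoop xs saw =
      if xs.any (pvHighEvidence.contains ·) then "high"
      else if saw || xs.any (pvModerateEvidence.contains ·) then "moderate" else "emerging" := by
  induction xs generalizing saw with
  | nil => cases saw <;> simp [pvBLoop]
  | cons g rest ih =>
      by_cases h : g ∈ pvHighEvidence
      · simp [pvBLoop, h]
      · by_cases hm : g ∈ pvModerateEvidence <;>
          cases saw <;> simp [pvBLoop, h, hm, ih]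

-- ===== VERDICT (by name: the statement is the Claim_ definition above) =====
theorem assess_evidence_level_py_spec : Claim_equal_assess_evidence_level_py := by
  intro goals _
  unfold Spec_assess_evidence_level_py assess_evidence_level_py assess_evidence_level_py_alt
  rw [pvALoop1_char, pvBLoop_char, pvALoop2_char]
  simp
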